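-- pv_equiv track=rewrite | github.com/mpv-player/mpv | TOOLS/matroska.py | camelcase_to_words
-- ===== SOURCE A (Python) =====
-- def camelcase_to_words(name: str) -> str:
--     parts = []
--     start = 0
--     for i in range(1, len(name)):
--         if name[i].isupper() and (name[i-1].islower() or
--                                   name[i+1:i+2].islower()):
--             parts.append(name[start:i])
--             start = i
--     parts.append(name[start:])
--     return "_".join(parts).lower()
-- ===== SOURCE B (Python) =====
-- def camelcase_to_words(name: str) -> str:
--     out = []
--     for i, c in enumerate(name):
--         if i and c.isupper() and (name[i-1].islower() or name[i+1:i+2].islower()):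
--             out.append('_')
--         out.append(c.lower())
--     return ''.join(out)
-- ===== Notes on version B (the rewrite author's own statement) =====
-- stated objective: simpler
-- what changed: A accumulates a list of word slices via a start pointer and joins/lowercases at the end; B makes a single per-character pass that emits the lowercased character directly, preceded by an underscore at each camelCase boundary, with no slicing, part list or final join.
import Mathlib
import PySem

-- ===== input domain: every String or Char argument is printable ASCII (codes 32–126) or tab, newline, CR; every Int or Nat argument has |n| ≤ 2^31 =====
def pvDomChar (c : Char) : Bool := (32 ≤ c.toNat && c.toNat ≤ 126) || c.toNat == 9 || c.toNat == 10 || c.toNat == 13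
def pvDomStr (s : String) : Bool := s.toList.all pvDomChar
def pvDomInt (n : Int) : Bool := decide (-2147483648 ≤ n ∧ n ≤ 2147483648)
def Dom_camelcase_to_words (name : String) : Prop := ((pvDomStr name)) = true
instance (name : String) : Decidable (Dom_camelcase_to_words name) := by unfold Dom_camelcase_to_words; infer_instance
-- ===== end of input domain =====

-- B replaces A's part-list/start-pointer accumulation of slices joined and lowered at the
-- end by a single per-character pass that emits the lowercased character, prefixed by an
-- underscore at each boundary (objective: simpler; equal in return value, no mutation involved).

-- ===== PORT A =====
-- shared boundary neighbour test: name[i-1].islower() or name[i+1:i+2].islower();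
-- the slice name[i+1:i+2] has length ≤ 1, so its .islower() is exactly the char test
-- (empty slice → False) — exact on every input.
def cwNbrLower (cs : List Char) (i : Int) : Bool :=
  (PySem.List.pyGet? cs (i - 1)).elim false PySem.Chars.islower
  || (PySem.List.pyGet? cs (i + 1)).elim false PySem.Chars.islower

-- loop body of A: on a boundary, close the current part (name[start:i]) and restart at i
def cwStep (cs : List Char) (acc : List (List Char) × Int) (i : Int) :
    List (List Char) × Int :=
  if (PySem.List.pyGet? cs i).elim false PySem.Chars.isupper && cwNbrLower cs i then
    (acc.1 ++ [PySem.List.slice cs (some acc.2) (some i)], i)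
  else acc

def camelcase_to_words (name : String) : String :=
  let cs := name.toList
  let st := (PySem.List.pyRange 1 (cs.length : Int)).foldl (cwStep cs) ([], 0)
  String.ofList (PySem.Chars.lower
    (PySem.Chars.join ['_'] (st.1 ++ [PySem.List.slice cs (some st.2) none])))

-- ===== PORT B =====
-- what B emits for one enumerated character (i, c): an optional underscore at a boundary, then c.lower()
def cwEmit (cs : List Char) (p : Int × Char) : List Char :=
  (if (p.1 != 0) && PySem.Chars.isupper p.2 && cwNbrLower cs p.1 then ['_'] else [])
  ++ [PySem.Chars.lowerChar p.2]

def camelcase_to_words_alt (name : String) : String :=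
  let cs := name.toList
  String.ofList ((PySem.List.enumerate cs 0).foldl (fun out p => out ++ cwEmit cs p) [])

-- ===== PRECONDITION & SPEC =====
def Spec_camelcase_to_words (name : String) (out : String) : Prop := out = camelcase_to_words_alt name
instance (name : String) (out : String) : Decidable (Spec_camelcase_to_words name out) := by unfold Spec_camelcase_to_words; infer_instance

-- ===== CLAIM (what is proved, stated in full; the proofs are below) =====
def Claim_equal_camelcase_to_words : Prop := ∀ (name : String), Dom_camelcase_to_words name → Spec_camelcase_to_words name (camelcase_to_words name)

-- ===== LEMMAS AND PROOFS =====

-- sep.join (xs ++ [a ++ b]) extends the last part in place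
lemma cw_join_snoc_append (sep : List Char) (xs : List (List Char)) (a b : List Char) :
    PySem.Chars.join sep (xs ++ [a ++ b]) = PySem.Chars.join sep (xs ++ [a]) ++ b := by
  induction xs with
  | nil => simp [PySem.Chars.join_singleton]
  | cons x xs ih =>
    cases xs with
    | nil =>
      simp only [List.cons_append, List.nil_append, PySem.Chars.join_cons_cons,
        PySem.Chars.join_singleton, List.append_assoc]
    | cons y ys =>
      simp only [List.cons_append, PySem.Chars.join_cons_cons] at *
      simp [ih, List.append_assoc]

-- sep.join (xs ++ [a] ++ [b]) = sep.join (xs ++ [a]) ++ sep ++ b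
lemma cw_join_snoc_snoc (sep : List Char) (xs : List (List Char)) (a b : List Char) :
    PySem.Chars.join sep (xs ++ [a] ++ [b])
      = PySem.Chars.join sep (xs ++ [a]) ++ sep ++ b := by
  induction xs with
  | nil => simp [PySem.Chars.join_cons_cons, PySem.Chars.join_singleton]
  | cons x xs ih =>
    cases xs with
    | nil =>
      simp only [List.cons_append, List.nil_append, PySem.Chars.join_cons_cons,
        PySem.Chars.join_singleton, List.append_assoc]
    | cons y ys =>
      simp only [List.append_assoc, List.cons_append, List.nil_append,
        PySem.Chars.join_cons_cons] at ih ⊢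
      simp [ih]

-- A's loop invariant: after processing indices 1..k-1, the joined-and-lowered parts
-- (current open part closed at k) are exactly B's emissions for the first k characters.
lemma cw_loop_inv (cs : List Char) (k : Nat) (hk : k ≤ cs.length) :
    ∃ s : Nat, s ≤ k ∧
      ((PySem.List.pyRange 1 (k : Int)).foldl (cwStep cs) ([], 0)).2 = (s : Int) ∧
      PySem.Chars.lower (PySem.Chars.join ['_']
        (((PySem.List.pyRange 1 (k : Int)).foldl (cwStep cs) ([], 0)).1
          ++ [PySem.List.slice cs (some (s : Int)) (some (k : Int))]))
        = ((PySem.List.enumerate cs 0).take k).flatMap (cwEmit cs) := by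
  induction k with
  | zero =>
    refine ⟨0, le_refl _, ?_, ?_⟩ <;>
      simp [PySem.List.pyRange, PySem.Chars.join_singleton, PySem.List.slice_to,
        PySem.Chars.lower]
  | succ k ih =>
    rcases Nat.eq_zero_or_pos k with hk0 | hkpos
    · subst hk0
      have hr : PySem.List.pyRange 1 ((1 : Nat) : Int) = [] := by decide
      refine ⟨0, Nat.zero_le _, ?_, ?_⟩
      · rw [hr]; rfl
      · rw [hr]
        obtain ⟨c, rest, hcs⟩ : ∃ c rest, cs = c :: rest := by
          cases cs with
          | nil => simp at hk
          | cons c rest => exact ⟨c, rest, rfl⟩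
        subst hcs
        simp [PySem.List.slice_to, PySem.Chars.join_singleton,
          PySem.Chars.lower, PySem.List.enumerate_cons, cwEmit]
    · obtain ⟨s, hs, hst2, heq⟩ := ih (le_of_lt hk)
      have hklt : k < cs.length := hk
      have hpeel : PySem.List.pyRange 1 ((k + 1 : Nat) : Int)
          = PySem.List.pyRange 1 (k : Int) ++ [(k : Int)] := by
        push_cast
        exact PySem.List.pyRange_one_succ_right (by exact_mod_cast hkpos)
      have hget : PySem.List.pyGet? cs ((k : Nat) : Int) = some cs[k] := by
        rw [PySem.List.pyGet?_natCast]; simp [hklt]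
      have htake : (PySem.List.enumerate cs 0).take (k + 1)
          = (PySem.List.enumerate cs 0).take k ++ [((k : Int), cs[k])] := by
        rw [List.take_add_one, PySem.List.getElem?_enumerate]
        simp [hklt]
      have hkne : (((k : Nat) : Int) != 0) = true := by
        simp only [bne_iff_ne, ne_eq, Nat.cast_eq_zero]
        omega
      have hslice : PySem.List.slice cs (some ((k : Nat) : Int)) (some ((k + 1 : Nat) : Int))
          = [cs[k]] := by
        rw [PySem.List.slice_natCast]
        have h1 : k + 1 - k = 1 := by omega
        rw [h1, List.drop_eq_getElem_cons hklt]
        rfl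
      rw [hpeel, List.foldl_append]
      set st := (PySem.List.pyRange 1 (k : Int)).foldl (cwStep cs) ([], (0 : Int)) with hstdef
      simp only [List.foldl_cons, List.foldl_nil, cwStep, hget, Option.elim]
      by_cases hc : (PySem.Chars.isupper cs[k] && cwNbrLower cs ((k : Nat) : Int)) = true
      · -- boundary at k: A closes the part, B emits an underscore and the lowered char
        rw [if_pos hc]
        refine ⟨k, Nat.le_succ _, rfl, ?_⟩
        rw [hst2, hslice, cw_join_snoc_snoc, htake, List.flatMap_append, ← heq]
        have hemit : cwEmit cs ((k : Int), cs[k]) = ['_', PySem.Chars.lowerChar cs[k]] := by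
          simp [cwEmit, hkne, hc]
        have h_ : PySem.Chars.lowerChar '_' = '_' := by decide
        simp only [List.flatMap_cons, List.flatMap_nil, List.append_nil, hemit]
        simp [PySem.Chars.lower, h_]
      · -- no boundary: A keeps accumulating, B emits only the lowered char
        rw [if_neg hc]
        refine ⟨s, le_trans hs (Nat.le_succ _), hst2, ?_⟩
        have hslice2 : PySem.List.slice cs (some (s : Int)) (some ((k + 1 : Nat) : Int))
            = PySem.List.slice cs (some (s : Int)) (some (k : Int)) ++ [cs[k]] := by
          rw [PySem.List.slice_natCast, PySem.List.slice_natCast]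
          have h1 : k + 1 - s = (k - s) + 1 := by omega
          rw [h1, List.take_add_one]
          have h2 : (List.drop s cs)[k - s]? = some cs[k] := by
            rw [List.getElem?_drop]
            have h3 : s + (k - s) = k := by omega
            rw [h3]
            simp [hklt]
          rw [h2]
          rfl
        have hemit : cwEmit cs ((k : Int), cs[k]) = [PySem.Chars.lowerChar cs[k]] := by
          simp only [cwEmit, hkne, Bool.true_and]
          rw [if_neg hc]
          rfl
        rw [hslice2, cw_join_snoc_append, htake, List.flatMap_append, ← heq]
        simp only [List.flatMap_cons, List.flatMap_nil, List.append_nil, hemit]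
        simp [PySem.Chars.lower]

theorem camelcase_to_words_spec : Claim_equal_camelcase_to_words := by
  intro name _
  unfold Spec_camelcase_to_words camelcase_to_words camelcase_to_words_alt
  dsimp only
  obtain ⟨s, hs, hst2, heq⟩ := cw_loop_inv name.toList name.toList.length (le_refl _)
  rw [PySem.List.foldl_append_eq_flatMap]
  rw [hst2, PySem.List.slice_from_natCast]
  have h1 : PySem.List.slice name.toList (some (s : Int)) (some (name.toList.length : Int))
      = List.drop s name.toList := by
    rw [PySem.List.slice_natCast]
    exact List.take_of_length_le (by simp)
  have h2 : (PySem.List.enumerate name.toList 0).take name.toList.length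
      = PySem.List.enumerate name.toList 0 := by
    exact List.take_of_length_le (by rw [PySem.List.length_enumerate])
  rw [h1, h2] at heq
  rw [heq, List.nil_append]
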